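-- pv_equiv track=rewrite | github.com/DanteDeRuwe/fys-ster-programmeren-1 | Reeks05/ierseturken.py | codeer
-- ===== SOURCE A (Python) =====
-- def isKlinker(letter):
--     """
--     >>> isKlinker('a')
--     True
--     >>> isKlinker('c')
--     False
--     >>> isKlinker('E')
--     True
--     """
--
--     if letter.lower() in ('a', 'e', 'i', 'o', 'u'):
--         klinker = True
--     else:
--         klinker = False
--     return klinker
--
-- def codeer(woord):
--     """
--     >>> codeer('Fabiano')
--     'Fabababianabo'
--     >>> codeer('CIA-agent')
--     'CAbiA-abagabent'
--     """
--     klinkergroep = ''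
--     output = ''
--     for i, letter in enumerate(woord): #overloop alle letters in een woord en hou de indices bij
--         if isKlinker(letter):   #als de letter een klinker is, voeg het toe aan een groepje
--             klinkergroep += letter
--         if not isKlinker(letter) or i == (len(woord)-1):    #vanaf het geen klinker is of we zijn aan het einde van het woord
--             if len(klinkergroep) > 0:   #als er klinkers zijn
--                 if klinkergroep[0].isupper():   #als klinkergroep begint met hoofdletter
--                     output += 'Ab'+ (klinkergroep[0]).lower() + klinkergroep[1:]
--                 else: #kleine letter
--                     output += 'ab' + klinkergroep
--             if not isKlinker(letter): #als letter TOCH een klinker was, doordat het de laatste letter vh woord is, hoef je deze niet nog eens extra aan output toe te voegen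
--                 output += letter
--             klinkergroep = ''
--     return output
-- ===== SOURCE B (Python) =====
-- def codeer(woord):
--     """
--     >>> codeer('Fabiano')
--     'Fabababianabo'
--     >>> codeer('CIA-agent')
--     'CAbiA-abagabent'
--     """
--     pieces = []
--     i = 0
--     n = len(woord)
--     while i < n:
--         c = woord[i]
--         v = c.lower() in 'aeiou'
--         j = i + 1
--         while j < n and (woord[j].lower() in 'aeiou') == v:
--             j += 1
--         run = woord[i:j]
--         if v:
--             if c.isupper():
--                 pieces.append('Ab' + c.lower() + run[1:])
--             else:
--                 pieces.append('ab' + run)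
--         else:
--             pieces.append(run)
--         i = j
--     return ''.join(pieces)
-- ===== Notes on version B (the rewrite author's own statement) =====
-- stated objective: simpler
-- what changed: B partitions the word into maximal vowel/non-vowel runs with a two-pointer scan and encodes each run uniformly via slicing and a joined piece list, replacing A's per-letter state machine with its pending-group string accumulator, double vowel test per letter and end-of-word index guard.
import Mathlib
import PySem

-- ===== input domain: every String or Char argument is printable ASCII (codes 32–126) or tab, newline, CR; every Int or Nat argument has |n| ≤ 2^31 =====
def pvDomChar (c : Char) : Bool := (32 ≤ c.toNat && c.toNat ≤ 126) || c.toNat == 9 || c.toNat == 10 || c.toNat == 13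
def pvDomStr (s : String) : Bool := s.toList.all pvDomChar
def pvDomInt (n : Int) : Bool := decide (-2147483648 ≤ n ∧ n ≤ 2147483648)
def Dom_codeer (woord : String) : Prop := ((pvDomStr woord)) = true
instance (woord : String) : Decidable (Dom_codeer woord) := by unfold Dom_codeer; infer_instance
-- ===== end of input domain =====

-- B replaces A's per-letter state machine (pending vowel group + end-of-word index guard)
-- with a two-pointer scan over maximal vowel/non-vowel runs, encoding each run uniformly
-- (objective: simpler decomposition; same O(n) cost).

-- ===== PORT A =====
-- Char.toLower / Char.isUpper are exact for the ASCII domain (Python's .lower()/.isupper() on one char)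
def isKlinker (letter : Char) : Bool :=
  if (['a','e','i','o','u'].contains letter.toLower) then true else false

def codeerStep (n : Int) (st : List Char × List Char) (p : Int × Char) :
    List Char × List Char :=
  let klinkergroep := if isKlinker p.2 then st.1 ++ [p.2] else st.1
  if !isKlinker p.2 || p.1 == n - 1 then
    let output :=
      if klinkergroep.length > 0 then
        (if (klinkergroep.headD ' ').isUpper then
           st.2 ++ 'A' :: 'b' :: (klinkergroep.headD ' ').toLower :: klinkergroep.tail
         else st.2 ++ 'a' :: 'b' :: klinkergroep)
      else st.2
    let output := if !isKlinker p.2 then output ++ [p.2] else output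
    ([], output)
  else (klinkergroep, st.2)

def codeer (woord : String) : String :=
  String.ofList (((PySem.List.enumerate woord.toList).foldl
    (codeerStep (woord.toList.length : Int)) ([], [])).2)

-- ===== PORT B =====
-- `c.lower() in 'aeiou'` on a single char = membership; exact on the ASCII domain
def isVowelB (c : Char) : Bool := "aeiou".toList.contains c.toLower

def codeerRuns : List Char → List Char
  | [] => []
  | c :: rest =>
    let v := isVowelB c
    let run := c :: rest.takeWhile (fun d => isVowelB d == v)
    let rest' := rest.dropWhile (fun d => isVowelB d == v)
    (if v then
       (if c.isUpper then 'A' :: 'b' :: c.toLower :: run.tail else 'a' :: 'b' :: run)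
     else run) ++ codeerRuns rest'
termination_by l => l.length
decreasing_by exact Nat.lt_succ_of_le (List.length_dropWhile_le _ _)

def codeer_alt (woord : String) : String := String.ofList (codeerRuns woord.toList)

-- ===== PRECONDITION & SPEC =====
def Spec_codeer (woord : String) (out : String) : Prop := out = codeer_alt woord
instance (woord : String) (out : String) : Decidable (Spec_codeer woord out) := by unfold Spec_codeer; infer_instance

-- ===== CLAIM (what is proved, stated in full; the proofs are below) =====
def Claim_equal_codeer : Prop := ∀ (woord : String), Dom_codeer woord → Spec_codeer woord (codeer woord)

-- ===== LEMMAS AND PROOFS =====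

-- encode one vowel group (A's flush expression / B's vowel-run expression)
def enc : List Char → List Char
  | [] => []
  | h :: t => if h.isUpper then 'A' :: 'b' :: h.toLower :: t else 'a' :: 'b' :: h :: t

-- common specification: A's loop semantics as a recursion
def aSpec : List Char → List Char → List Char
  | _, [] => []
  | g, [c] => if isKlinker c then enc (g ++ [c]) else enc g ++ [c]
  | g, c :: c2 :: r =>
    if isKlinker c then aSpec (g ++ [c]) (c2 :: r) else enc g ++ c :: aSpec [] (c2 :: r)

lemma isVowelB_eq_isKlinker (c : Char) : isVowelB c = isKlinker c := by
  simp [isVowelB, isKlinker]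

lemma enc_emit (out gg : List Char) :
    (if gg.length > 0 then
       (if (gg.headD ' ').isUpper then
          out ++ 'A' :: 'b' :: (gg.headD ' ').toLower :: gg.tail
        else out ++ 'a' :: 'b' :: gg)
     else out) = out ++ enc gg := by
  cases gg with
  | nil => simp [enc]
  | cons h t => by_cases hu : h.isUpper <;> simp [enc, hu]

lemma codeerStep_flush (n k : Int) (g out : List Char) (c : Char)
    (h : (k == n - 1) = true) :
    codeerStep n (g, out) (k, c) = ([], out ++ aSpec g [c]) := by
  by_cases hv : isKlinker c
  · simp only [codeerStep, hv, h, Bool.not_true, Bool.false_or, if_true]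
    rw [enc_emit]
    simp [aSpec, hv]
  · simp only [codeerStep, hv, h, Bool.not_false, Bool.true_or, if_true]
    rw [enc_emit]
    simp [aSpec, hv, List.append_assoc]

lemma codeerStep_cont (n k : Int) (g out : List Char) (c : Char)
    (h : (k == n - 1) = false) :
    codeerStep n (g, out) (k, c) =
      if isKlinker c then (g ++ [c], out) else ([], out ++ (enc g ++ [c])) := by
  by_cases hv : isKlinker c
  · simp [codeerStep, hv, h]
  · simp only [codeerStep, hv, h, Bool.not_false, Bool.true_or, if_true]
    rw [enc_emit]
    simp [List.append_assoc]

lemma foldl_codeerStep (n : Int) :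
    ∀ (l : List Char) (k : Int) (g out : List Char), l ≠ [] →
      k + (l.length : Int) = n →
      List.foldl (codeerStep n) (g, out) (PySem.List.enumerate l k) =
        ([], out ++ aSpec g l) := by
  intro l
  induction l with
  | nil => intro k g out h _; exact absurd rfl h
  | cons c rest ih =>
    intro k g out _ hk
    cases rest with
    | nil =>
      have hk' : (k == n - 1) = true := by
        simp only [List.length_cons, List.length_nil] at hk
        simp only [beq_iff_eq]; omega
      rw [PySem.List.enumerate_cons, PySem.List.enumerate_nil]
      simp only [List.foldl_cons, List.foldl_nil]
      exact codeerStep_flush n k g out c hk'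
    | cons c2 r =>
      have hk' : (k == n - 1) = false := by
        simp only [List.length_cons] at hk
        simp only [beq_eq_false_iff_ne, ne_eq]
        push_cast at hk; omega
      rw [PySem.List.enumerate_cons]
      simp only [List.foldl_cons]
      rw [codeerStep_cont n k g out c hk']
      by_cases hv : isKlinker c
      · rw [if_pos hv,
          ih (k + 1) (g ++ [c]) out (by simp) (by simp only [List.length_cons] at hk ⊢; push_cast at hk ⊢; omega)]
        simp [aSpec, hv]
      · rw [if_neg hv,
          ih (k + 1) [] (out ++ (enc g ++ [c])) (by simp) (by simp only [List.length_cons] at hk ⊢; push_cast at hk ⊢; omega)]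
        simp [aSpec, hv, List.append_assoc]

lemma aSpec_consonant_head (c : Char) (r : List Char) (h : isKlinker c = false) :
    aSpec [] (c :: r) = c :: aSpec [] r := by
  cases r with
  | nil => simp [aSpec, h, enc]
  | cons c2 t => simp [aSpec, h, enc]

lemma aSpec_vowel_group :
    ∀ (rest : List Char) (g : List Char), rest ≠ [] →
      aSpec g rest =
        enc (g ++ rest.takeWhile isKlinker) ++ aSpec [] (rest.dropWhile isKlinker) := by
  intro rest
  induction rest with
  | nil => intro g h; exact absurd rfl h
  | cons c r ih =>
    intro g _
    by_cases hv : isKlinker c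
    · cases r with
      | nil => simp [aSpec, hv, List.takeWhile, List.dropWhile]
      | cons c2 t =>
        have := ih (g ++ [c]) (by simp)
        simp only [aSpec, hv, if_true] at this ⊢
        rw [this]
        simp [List.takeWhile_cons, List.dropWhile_cons, hv, List.append_assoc]
    · have h' : isKlinker c = false := by simpa using hv
      cases r with
      | nil => simp [aSpec, h', enc]
      | cons c2 t => simp [aSpec, h', enc]

lemma aSpec_consonant_run :
    ∀ (rest : List Char),
      aSpec [] rest =
        rest.takeWhile (fun d => !isKlinker d) ++
          aSpec [] (rest.dropWhile (fun d => !isKlinker d)) := by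
  intro rest
  induction rest with
  | nil => simp [aSpec]
  | cons c r ih =>
    by_cases hv : isKlinker c
    · simp [hv]
    · have h' : isKlinker c = false := by simpa using hv
      rw [List.takeWhile_cons, List.dropWhile_cons]
      simp only [h', Bool.not_false, if_true]
      rw [aSpec_consonant_head c r h', ih]
      simp

theorem codeerRuns_eq : (l : List Char) → codeerRuns l = aSpec [] l
  | [] => by simp [codeerRuns, aSpec]
  | c :: rest => by
    have hrec := codeerRuns_eq (rest.dropWhile (fun d => isVowelB d == isVowelB c))
    rw [codeerRuns]
    by_cases hv : isVowelB c = true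
    · have hk : isKlinker c = true := by rw [← isVowelB_eq_isKlinker, hv]
      have hp : (fun d => isVowelB d == isVowelB c) = isKlinker := by
        funext d; rw [hv, isVowelB_eq_isKlinker]; simp
      rw [hp] at hrec ⊢
      cases rest with
      | nil =>
        simp [aSpec, hk, hv, enc, codeerRuns]
      | cons c2 r =>
        have hg := aSpec_vowel_group (c2 :: r) [c] (by simp)
        simp only [aSpec, hk, if_true, List.nil_append] at hg ⊢
        rw [hg, hrec]
        simp only [hv, if_true, enc]
        by_cases hu : c.isUpper <;> simp [hu]
    · have hv' : isVowelB c = false := by simpa using hv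
      have hk : isKlinker c = false := by rw [← isVowelB_eq_isKlinker, hv']
      have hp : (fun d => isVowelB d == isVowelB c) = (fun d => !isKlinker d) := by
        funext d; rw [hv', isVowelB_eq_isKlinker]; cases isKlinker d <;> simp
      rw [hp] at hrec ⊢
      rw [aSpec_consonant_head c rest hk, aSpec_consonant_run rest, hrec]
      simp [hv']
termination_by l => l.length
decreasing_by exact Nat.lt_succ_of_le (List.length_dropWhile_le _ _)

-- ===== VERDICT (by name: the statement is the Claim_ definition above) =====
theorem codeer_spec : Claim_equal_codeer := by
  intro woord _
  unfold Spec_codeer codeer codeer_alt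
  cases hcs : woord.toList with
  | nil => simp [PySem.List.enumerate, codeerRuns]
  | cons c rest =>
    rw [foldl_codeerStep ((c :: rest).length : Int) (c :: rest) 0 [] [] (by simp) (by simp),
      codeerRuns_eq]
    simp
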